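-- pv_equiv track=rewrite | github.com/alexandremariano4/estoque_txt | produtos.py | VerificaDecimal
-- ===== SOURCE A (Python) =====
-- def VerificaDecimal(preco):
--     if ValidaPreco(preco) > 1:
--         return False
--     cont = 0
--     pare = 0
--     for qtd,digito in enumerate(preco):
--         cont += 1
--         if digito == ',':
--             pare = cont
--         if qtd == 0:
--             cont = 0
--     if cont == pare+2:
--         return True
--     else:
--         return False
--
-- def ValidaPreco(preco):
--     cont = 0
--     for i,digito in enumerate(preco):
--         if digito == ',':
--             cont += 1
--         if i == 0 and digito == ',':
--             return cont + 2
--     return cont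
-- ===== SOURCE B (Python) =====
-- def VerificaDecimal(preco):
--     parts = preco.split(',')
--     if len(parts) > 2:
--         return False
--     if len(parts) == 2:
--         if parts[0] == '':
--             return False
--         return len(parts[1]) == 2
--     return len(parts[0]) == 3
-- ===== Notes on version B (the rewrite author's own statement) =====
-- stated objective: simpler
-- what changed: Replaced A's two stateful character-position scans (a comma-counting helper with an early return, plus an enumerate loop tracking the last comma's offset) by a single str.split followed by case analysis on the number and lengths of the parts.
import Mathlib
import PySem

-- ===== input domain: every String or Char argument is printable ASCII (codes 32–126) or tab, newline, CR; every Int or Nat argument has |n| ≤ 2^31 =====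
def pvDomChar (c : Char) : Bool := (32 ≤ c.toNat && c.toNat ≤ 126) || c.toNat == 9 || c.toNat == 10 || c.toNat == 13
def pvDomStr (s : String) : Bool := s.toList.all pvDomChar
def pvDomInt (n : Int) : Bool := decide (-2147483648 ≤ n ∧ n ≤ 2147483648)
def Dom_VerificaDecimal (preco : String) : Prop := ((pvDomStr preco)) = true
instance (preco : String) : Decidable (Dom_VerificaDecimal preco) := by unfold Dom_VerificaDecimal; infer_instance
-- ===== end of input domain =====

-- B replaces A's two character-position scans (a helper counting commas plus a stateful
-- enumerate loop tracking the last comma's offset) by one split on ',' and reasoning on the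
-- resulting parts list (objective: simpler).

-- ===== PORT A =====
-- loop of ValidaPreco: for i, digito in enumerate(preco): …
def pvVPLoop : List (Int × Char) → Int → Int
  | [], cont => cont
  | (i, d) :: rest, cont =>
    let cont := if d = ',' then cont + 1 else cont
    if i = 0 ∧ d = ',' then cont + 2 else pvVPLoop rest cont

def ValidaPreco (preco : String) : Int :=
  pvVPLoop (PySem.List.enumerate preco.toList) 0

-- loop of VerificaDecimal: for qtd, digito in enumerate(preco): …
def pvVDLoop : List (Int × Char) → Int → Int → Int × Int
  | [], cont, pare => (cont, pare)
  | (qtd, d) :: rest, cont, pare =>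
    let cont := cont + 1
    let pare := if d = ',' then cont else pare
    let cont := if qtd = 0 then 0 else cont
    pvVDLoop rest cont pare

def VerificaDecimal (preco : String) : Bool :=
  if ValidaPreco preco > 1 then false
  else
    let cp := pvVDLoop (PySem.List.enumerate preco.toList) 0 0
    if cp.1 = cp.2 + 2 then true else false

-- ===== PORT B =====
-- parts = preco.split(',') ported as List.splitOn on the characters (exact for a 1-char separator)
def VerificaDecimal_alt (preco : String) : Bool :=
  let parts := preco.toList.splitOn ','
  if parts.length > 2 then false
  else if parts.length = 2 then
    if PySem.List.pyGetD parts 0 [] = [] then false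
    else decide ((PySem.List.pyGetD parts 1 []).length = 2)
  else decide ((PySem.List.pyGetD parts 0 []).length = 3)

-- ===== PRECONDITION & SPEC =====
def Spec_VerificaDecimal (preco : String) (out : Bool) : Prop := out = VerificaDecimal_alt preco
instance (preco : String) (out : Bool) : Decidable (Spec_VerificaDecimal preco out) := by unfold Spec_VerificaDecimal; infer_instance

-- ===== CLAIM (what is proved, stated in full; the proofs are below) =====
def Claim_equal_VerificaDecimal : Prop := ∀ (preco : String), Dom_VerificaDecimal preco → Spec_VerificaDecimal preco (VerificaDecimal preco)

-- ===== LEMMAS AND PROOFS =====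

-- the final value of `pare` produced by A's main loop on the characters after the first one
def pvPareSpec : List Char → Int → Int → Int
  | [], _, pare => pare
  | d :: t, cont, pare => pvPareSpec t (cont + 1) (if d = ',' then cont + 1 else pare)

theorem pvVPLoop_tail (l : List Char) (s cont : Int) (hs : 1 ≤ s) :
    pvVPLoop (PySem.List.enumerate l s) cont = cont + (l.count ',' : Int) := by
  induction l generalizing s cont with
  | nil => simp [PySem.List.enumerate, pvVPLoop]
  | cons c t ih =>
    have hs0 : s ≠ 0 := by omega
    by_cases hc : c = ','
    · simp [PySem.List.enumerate, pvVPLoop, hc, hs0, ih (s + 1) (cont + 1) (by omega)]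
      ring
    · simp [PySem.List.enumerate, pvVPLoop, hc, hs0, ih (s + 1) cont (by omega)]

theorem pvVDLoop_tail (l : List Char) (s cont pare : Int) (hs : 1 ≤ s) :
    pvVDLoop (PySem.List.enumerate l s) cont pare = (cont + (l.length : Int), pvPareSpec l cont pare) := by
  induction l generalizing s cont pare with
  | nil => simp [PySem.List.enumerate, pvVDLoop, pvPareSpec]
  | cons c t ih =>
    have hs0 : ¬ (s = 0) := by omega
    simp only [PySem.List.enumerate, pvVDLoop, pvPareSpec, hs0, if_false]
    rw [ih (s + 1) (cont + 1) _ (by omega)]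
    simp; ring

theorem pvPareSpec_no_comma (l : List Char) (cont pare : Int) (h : l.count ',' = 0) :
    pvPareSpec l cont pare = pare := by
  induction l generalizing cont pare with
  | nil => rfl
  | cons c t ih =>
    have hc : c ≠ ',' := by
      intro hc; subst hc; simp at h
    have ht : t.count ',' = 0 := by
      simp [hc] at h; omega
    simp [pvPareSpec, hc, ih _ _ ht]

theorem pvPareSpec_last (u v : List Char) (cont pare : Int) (hv : v.count ',' = 0) :
    pvPareSpec (u ++ ',' :: v) cont pare = cont + (u.length : Int) + 1 := by
  induction u generalizing cont pare with
  | nil => simp [pvPareSpec, pvPareSpec_no_comma v _ _ hv]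
  | cons c t ih => simp [pvPareSpec, ih]; ring

theorem pv_splitOn_length (l : List Char) : (l.splitOn ',').length = l.count ',' + 1 := by
  induction l with
  | nil => simp [List.splitOn]
  | cons c t ih =>
    by_cases hc : c = ','
    · simp [List.splitOn, List.splitOnP_cons, hc]
      simpa [List.splitOn] using ih
    · simp [List.splitOn, List.splitOnP_cons, hc]
      simpa [List.splitOn] using ih

theorem pv_splitOn_no_comma (l : List Char) (h : l.count ',' = 0) : l.splitOn ',' = [l] := by
  induction l with
  | nil => simp [List.splitOn]
  | cons c t ih =>
    have hc : c ≠ ',' := by intro hc; subst hc; simp at h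
    have ht : t.count ',' = 0 := by simp [hc] at h; omega
    have := ih ht
    simp [List.splitOn, List.splitOnP_cons, hc] at this ⊢
    simp [this]

theorem pv_splitOn_one (u v : List Char) (hu : u.count ',' = 0) (hv : v.count ',' = 0) :
    (u ++ ',' :: v).splitOn ',' = [u, v] := by
  induction u with
  | nil => simp [List.splitOn, List.splitOnP_cons]
           simpa [List.splitOn] using pv_splitOn_no_comma v hv
  | cons c t ih =>
    have hc : c ≠ ',' := by intro hc; subst hc; simp at hu
    have ht : t.count ',' = 0 := by simp [hc] at hu; omega
    have := ih ht
    simp [List.splitOn, List.splitOnP_cons, hc] at this ⊢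
    simp [this]

theorem pv_count_one_decomp (l : List Char) (h : l.count ',' = 1) :
    ∃ u v, l = u ++ ',' :: v ∧ u.count ',' = 0 ∧ v.count ',' = 0 := by
  induction l with
  | nil => simp at h
  | cons c t ih =>
    by_cases hc : c = ','
    · subst hc
      have ht : t.count ',' = 0 := by simp at h; omega
      exact ⟨[], t, by simp, by simp, ht⟩
    · have ht : t.count ',' = 1 := by simp [hc] at h; omega
      obtain ⟨u, v, rfl, hu, hv⟩ := ih ht
      exact ⟨c :: u, v, rfl, by simp [hc, hu], hv⟩

-- head step of each of A's loops (index 0: the i == 0 branches fire exactly here)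
theorem pvVPLoop_cons (c : Char) (rest : List Char) :
    pvVPLoop (PySem.List.enumerate (c :: rest)) 0
      = if c = ',' then 3 else (rest.count ',' : Int) := by
  by_cases hc : c = ','
  · simp [PySem.List.enumerate, pvVPLoop, hc]
  · simp [PySem.List.enumerate, pvVPLoop, hc, pvVPLoop_tail rest 1 0 le_rfl]

theorem pvVDLoop_cons (c : Char) (rest : List Char) :
    pvVDLoop (PySem.List.enumerate (c :: rest)) 0 0
      = ((rest.length : Int), pvPareSpec rest 0 (if c = ',' then 1 else 0)) := by
  by_cases hc : c = ','
  · simp [PySem.List.enumerate, pvVDLoop, hc, pvVDLoop_tail rest 1 0 1 le_rfl]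
  · simp [PySem.List.enumerate, pvVDLoop, hc, pvVDLoop_tail rest 1 0 0 le_rfl]

theorem pv_splitOn_cons_comma (rest : List Char) :
    (',' :: rest).splitOn ',' = [] :: rest.splitOn ',' := by
  simp [List.splitOn, List.splitOnP_cons]

theorem pv_splitOn_cons_ne (c : Char) (rest : List Char) (hc : c ≠ ',') :
    (c :: rest).splitOn ',' = (rest.splitOn ',').modifyHead (c :: ·) := by
  simp [List.splitOn, List.splitOnP_cons, hc]

-- ===== VERDICT (by name: the statement is the Claim_ definition above) =====
theorem VerificaDecimal_spec : Claim_equal_VerificaDecimal := by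
  intro preco _
  unfold Spec_VerificaDecimal VerificaDecimal VerificaDecimal_alt ValidaPreco
  cases hl : preco.toList with
  | nil => simp [PySem.List.enumerate, pvVPLoop, pvVDLoop, List.splitOn, PySem.List.pyGetD, PySem.List.pyIdx?, PySem.List.pyGet?]
  | cons c rest =>
    rw [pvVPLoop_cons, pvVDLoop_cons]
    by_cases hc : c = ','
    · subst hc
      rw [if_pos rfl, if_pos (by norm_num : (3:Int) > 1), pv_splitOn_cons_comma]
      rcases Nat.eq_zero_or_pos (rest.count ',') with h0 | hpos
      · rw [pv_splitOn_no_comma rest h0]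
        simp [PySem.List.pyGetD, PySem.List.pyIdx?, PySem.List.pyGet?]
      · have hlen : ([] :: rest.splitOn ',').length > 2 := by
          have := pv_splitOn_length rest
          simp only [List.length_cons]; omega
        rw [if_pos hlen]
    · rw [if_neg hc, pv_splitOn_cons_ne c rest hc]
      simp only [hc, if_false]
      rcases h01 : rest.count ',' with _ | k
      · -- no comma at all
        rw [pv_splitOn_no_comma rest h01, pvPareSpec_no_comma rest _ _ h01]
        rw [if_neg (by norm_num : ¬ ((0:Nat):Int) > 1)]
        simp [PySem.List.pyGetD, PySem.List.pyIdx?, PySem.List.pyGet?]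
        omega
      rcases k with _ | k
      · -- exactly one comma
        obtain ⟨u, v, rfl, hu, hv⟩ := pv_count_one_decomp rest h01
        rw [pv_splitOn_one u v hu hv, pvPareSpec_last u v _ _ hv]
        rw [if_neg (by norm_num : ¬ ((1:Nat):Int) > 1)]
        simp [PySem.List.pyGetD, PySem.List.pyIdx?, PySem.List.pyGet?]
        omega
      · -- two or more commas
        rw [if_pos (by push_cast; omega : ((k + 1 + 1 : Nat) : Int) > 1)]
        have hlen : ((rest.splitOn ',').modifyHead (c :: ·)).length > 2 := by
          have := pv_splitOn_length rest
          simp only [List.length_modifyHead]; omega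
        rw [if_pos hlen]
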